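-- pv_equiv track=rewrite | github.com/ASK1995/Leetcode | 3167.py | betterCompression
-- ===== SOURCE A (Python) =====
-- from collections import Counter
--
-- def betterCompression(compressed: str) -> str:
--     count = Counter()
--     i, n = 0, len(compressed)
--
--     while(i < n):
--         j = i + 1
--         x = 0
--
--         while j < n and compressed[j].isdigit():
--             x = x * 10 + int(compressed[j])
--             j += 1
--
--         letter, value = compressed[i], x
--         count[letter] += value
--         i = j
--
--     res = ""
--
--     for key in range(97, 123):
--         if(count[chr(key)] != 0):
--             res += chr(key) + str(count[chr(key)])
--
--     return res
-- ===== SOURCE B (Python) =====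
-- def betterCompression(compressed: str) -> str:
--     n = len(compressed)
--     # val[i] = integer value of the maximal digit run starting at position i
--     # (filled in one right-to-left pass; no Counter, no left-to-right x = x*10 + d)
--     val = [0] * (n + 1)
--     runlen = 0
--     for i in range(n - 1, -1, -1):
--         if compressed[i].isdigit():
--             val[i] = int(compressed[i]) * 10 ** runlen + val[i + 1]
--             runlen += 1
--         else:
--             runlen = 0
--     parts = []
--     for letter in 'abcdefghijklmnopqrstuvwxyz':
--         total = sum(val[i + 1] for i in range(n) if compressed[i] == letter)
--         if total != 0:
--             parts.append(letter + str(total))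
--     return ''.join(parts)
-- ===== Notes on version B (the rewrite author's own statement) =====
-- stated objective: alternative
-- what changed: B drops the Counter entirely: a single right-to-left pass precomputes val[i], the value of the maximal digit run starting at i (via digit*10**runlen + val[i+1], not A's left-to-right x = x*10 + d), and then for each of the 26 letters the total is a positional sum of val[i+1] over that letter's occurrences; A instead does one left-to-right two-pointer scan into a Counter and reads it back over range(97,123).
import Mathlib
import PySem

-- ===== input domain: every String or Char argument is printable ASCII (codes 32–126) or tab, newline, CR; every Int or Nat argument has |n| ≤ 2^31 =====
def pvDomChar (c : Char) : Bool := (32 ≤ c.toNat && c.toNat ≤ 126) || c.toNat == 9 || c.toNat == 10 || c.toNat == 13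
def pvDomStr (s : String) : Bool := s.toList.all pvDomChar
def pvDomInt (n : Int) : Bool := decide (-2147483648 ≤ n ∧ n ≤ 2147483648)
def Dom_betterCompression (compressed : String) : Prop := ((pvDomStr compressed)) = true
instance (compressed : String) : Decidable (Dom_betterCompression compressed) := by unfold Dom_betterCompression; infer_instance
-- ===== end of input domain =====

-- B replaces A's left-to-right Counter scan by a right-to-left table of digit-run values
-- plus 26 independent per-letter positional sums (objective: alternative, same result).

-- ===== PORT A =====
-- inner `while j < n and compressed[j].isdigit(): x = x*10 + int(compressed[j]); j += 1`
-- (returns the accumulated x and the rest of the string from j on)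
def aDigits : Int → List Char → Int × List Char
  | x, [] => (x, [])
  | x, c :: cs =>
    if PySem.Chars.isdigit c then
      -- int(compressed[j]): exact, the guard guarantees a single ASCII digit
      aDigits (x * 10 + (PySem.Int.ofChars? [c]).getD 0) cs
    else (x, c :: cs)

theorem aDigits_length_le (x : Int) (cs : List Char) : (aDigits x cs).2.length ≤ cs.length := by
  induction cs generalizing x with
  | nil => simp [aDigits]
  | cons c t ih =>
    simp only [aDigits]
    split
    · exact le_trans (ih _) (Nat.le_succ _)
    · simp

-- outer `while i < n: … count[letter] += value; i = j`
def aLoop : List Char → PySem.Dict Char Int → PySem.Dict Char Int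
  | [], d => d
  | c :: cs, d => aLoop (aDigits 0 cs).2 (d.modify c 0 (· + (aDigits 0 cs).1))
termination_by cs _ => cs.length
decreasing_by
  exact Nat.lt_succ_of_le (aDigits_length_le 0 cs)

def betterCompression (compressed : String) : String :=
  let count := aLoop compressed.toList PySem.Dict.empty
  -- `for key in range(97, 123): if count[chr(key)] != 0: res += chr(key) + str(count[chr(key)])`
  (PySem.List.pyRange 97 123 1).foldl
    (fun res key =>
      if count.getD (Char.ofNat key.toNat) 0 ≠ 0 then
        res ++ String.ofList [Char.ofNat key.toNat]
            ++ PySem.Int.toStr (count.getD (Char.ofNat key.toNat) 0)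
      else res) ""

-- ===== PORT B =====
-- `for i in range(n-1, -1, -1): if s[i].isdigit(): val[i] = int(s[i])*10**runlen + val[i+1]; runlen += 1
--  else: runlen = 0`
-- the right-to-left fill of the array `val` is the structural recursion on the suffix:
-- bVal cs = (the list val[i..n] for the suffix cs, the current runlen); val[n] = 0
def bVal : List Char → List Int × Nat
  | [] => ([0], 0)
  | c :: cs =>
    let r := bVal cs
    if PySem.Chars.isdigit c then
      -- int(s[i]): exact, the guard guarantees a single ASCII digit
      ((((PySem.Int.ofChars? [c]).getD 0) * 10 ^ r.2 + r.1.headI) :: r.1, r.2 + 1)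
    else (0 :: r.1, 0)

-- 'abcdefghijklmnopqrstuvwxyz'
def alphabet : List Char :=
  ['a','b','c','d','e','f','g','h','i','j','k','l','m','n','o','p','q','r','s','t','u','v','w','x','y','z']

def betterCompression_alt (compressed : String) : String :=
  let cs := compressed.toList
  let vs := (bVal cs).1
  -- `for letter in 'abc…z': total = sum(val[i+1] for i in range(n) if compressed[i] == letter);
  --  if total != 0: parts.append(letter + str(total))` then `''.join(parts)`
  String.ofList (alphabet.flatMap (fun letter =>
    let total := ((PySem.List.pyRange 0 (PySem.List.len cs) 1).filter
        (fun i => PySem.List.pyGetD cs i ' ' == letter)).foldl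
        (fun acc i => acc + PySem.List.pyGetD vs (i + 1) 0) 0
    if total ≠ 0 then letter :: PySem.Int.toChars total else []))

-- ===== PRECONDITION & SPEC =====
def Spec_betterCompression (compressed : String) (out : String) : Prop := out = betterCompression_alt compressed
instance (compressed : String) (out : String) : Decidable (Spec_betterCompression compressed out) := by unfold Spec_betterCompression; infer_instance

-- ===== CLAIM (what is proved, stated in full; the proofs are below) =====
def Claim_equal_betterCompression : Prop := ∀ (compressed : String), Dom_betterCompression compressed → Spec_betterCompression compressed (betterCompression compressed)

-- ===== LEMMAS AND PROOFS =====

-- the sum of A's tokenization restricted to one letter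
def tokSum (c : Char) : List Char → Int
  | [] => 0
  | h :: t => (if h == c then (aDigits 0 t).1 else 0) + tokSum c (aDigits 0 t).2
termination_by cs => cs.length
decreasing_by
  exact Nat.lt_succ_of_le (aDigits_length_le 0 t)

-- B's positional sum, written structurally
def posSum (c : Char) : List Char → Int
  | [] => 0
  | h :: t => (if h == c then (bVal t).1.getD 0 0 else 0) + posSum c t

theorem aLoop_getD (c : Char) : ∀ (cs : List Char) (d : PySem.Dict Char Int),
    (aLoop cs d).getD c 0 = d.getD c 0 + tokSum c cs := by
  intro cs d
  induction cs, d using aLoop.induct with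
  | case1 d => simp [aLoop, tokSum]
  | case2 h t d ih =>
    rw [aLoop, tokSum, ih, PySem.Dict.getD_modify]
    by_cases hch : c = h
    · subst hch; simp; omega
    · simp [hch, Ne.symm hch]


theorem bVal_fst_cons (c : Char) (cs : List Char) :
    (bVal (c :: cs)).1
      = (if PySem.Chars.isdigit c then
          ((PySem.Int.ofChars? [c]).getD 0) * 10 ^ (bVal cs).2 + (bVal cs).1.headI
        else 0) :: (bVal cs).1 := by
  rw [bVal]; split <;> simp_all

theorem bVal_snd_cons (c : Char) (cs : List Char) :
    (bVal (c :: cs)).2 = if PySem.Chars.isdigit c then (bVal cs).2 + 1 else 0 := by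
  rw [bVal]; split <;> simp_all

theorem bVal_headI_eq_getD (cs : List Char) : (bVal cs).1.headI = (bVal cs).1.getD 0 0 := by
  cases cs with
  | nil => simp [bVal]
  | cons c t => rw [bVal_fst_cons]; simp

theorem aDigits_bVal (cs : List Char) : ∀ (x : Int),
    aDigits x cs = (x * 10 ^ (bVal cs).2 + (bVal cs).1.headI, cs.drop (bVal cs).2) := by
  induction cs with
  | nil => intro x; simp [aDigits, bVal]
  | cons c t ih =>
    intro x
    by_cases hd : PySem.Chars.isdigit c
    · rw [aDigits]
      simp only [hd, if_true, ih, bVal_fst_cons, bVal_snd_cons, List.headI_cons, List.drop_succ_cons,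
        Prod.mk.injEq]
      exact ⟨by ring, trivial⟩
    · rw [aDigits]
      simp [hd, bVal_fst_cons, bVal_snd_cons]

theorem posSum_drop (c : Char) (hc : PySem.Chars.isdigit c = false) (cs : List Char) :
    posSum c (cs.drop (bVal cs).2) = posSum c cs := by
  induction cs with
  | nil => simp [bVal]
  | cons h t ih =>
    rw [bVal_snd_cons]
    by_cases hd : PySem.Chars.isdigit h
    · have hne : (h == c) = false := by
        refine beq_eq_false_iff_ne.mpr ?_
        rintro rfl; rw [hd] at hc; exact Bool.true_eq_false.mp hc
      simp only [hd, if_true, List.drop_succ_cons, ih, posSum, hne, Bool.false_eq_true,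
        if_false, zero_add]
    · simp [hd]

theorem posSum_eq_tokSum (c : Char) (hc : PySem.Chars.isdigit c = false) :
    ∀ (cs : List Char), posSum c cs = tokSum c cs := by
  intro cs
  induction cs using tokSum.induct with
  | case1 => simp [posSum, tokSum]
  | case2 h t ih =>
    rw [posSum, tokSum, ← ih, aDigits_bVal]
    simp only [← posSum_drop c hc t, bVal_headI_eq_getD]
    ring_nf

theorem sum_eq_posSum (c : Char) (cs : List Char) :
    (((List.range cs.length).filter (fun i => cs.getD i ' ' == c)).map
        (fun i => (bVal cs).1.getD (i + 1) 0)).sum = posSum c cs := by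
  induction cs with
  | nil => simp [posSum]
  | cons h t ih =>
    rw [posSum, ← ih, List.length_cons, List.range_succ_eq_map, List.filter_cons, List.filter_map]
    have hfilter : List.filter ((fun i => (h :: t).getD i ' ' == c) ∘ Nat.succ) (List.range t.length)
        = List.filter (fun i => t.getD i ' ' == c) (List.range t.length) :=
      List.filter_congr (fun i _ => rfl)
    have hmap : ∀ l : List Nat,
        List.map (fun i => (bVal (h :: t)).1.getD (i + 1) 0) (List.map Nat.succ l)
          = List.map (fun i => (bVal t).1.getD (i + 1) 0) l := by
      intro l
      rw [List.map_map]
      apply List.map_congr_left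
      intro i _
      show (bVal (h :: t)).1.getD (i.succ + 1) 0 = _
      rw [bVal_fst_cons]
      rfl
    by_cases hb : (h == c) = true
    · simp only [List.getD_cons_zero, hb, if_true, List.map_cons, List.sum_cons, hfilter, hmap]
      congr 1
      rw [bVal_fst_cons]
      simp
    · rw [Bool.not_eq_true] at hb
      simp only [List.getD_cons_zero, hb, Bool.false_eq_true, if_false, hfilter, hmap, zero_add]

theorem total_eq_posSum (c : Char) (cs : List Char) :
    ((PySem.List.pyRange 0 (PySem.List.len cs) 1).filter
        (fun i => PySem.List.pyGetD cs i ' ' == c)).foldl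
        (fun acc i => acc + PySem.List.pyGetD (bVal cs).1 (i + 1) 0) 0 = posSum c cs := by
  rw [PySem.List.len_eq, PySem.List.pyRange_zero_natCast, List.filter_map,
    PySem.List.foldl_add, List.map_map, zero_add, ← sum_eq_posSum c cs]
  have hf : List.filter ((fun i => PySem.List.pyGetD cs i ' ' == c) ∘ fun k : Nat => (k : Int))
        (List.range cs.length)
      = List.filter (fun i => cs.getD i ' ' == c) (List.range cs.length) := by
    apply List.filter_congr
    intro i _
    simp [PySem.List.pyGetD_natCast]
  rw [hf]
  apply congrArg
  apply List.map_congr_left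
  intro i _
  show PySem.List.pyGetD (bVal cs).1 ((i : Int) + 1) 0 = _
  rw [show ((i : Int) + 1) = ((i + 1 : Nat) : Int) by push_cast; ring,
    PySem.List.pyGetD_natCast]

theorem foldl_if_toList (p : Int → Prop) [DecidablePred p] (g : Int → String)
    (l : List Int) : ∀ (init : String),
    (l.foldl (fun res k => if p k then res ++ g k else res) init).toList
      = init.toList ++ l.flatMap (fun k => if p k then (g k).toList else []) := by
  induction l with
  | nil => intro init; simp
  | cons a t ih =>
    intro init
    by_cases hp : p a <;> simp [List.foldl_cons, hp, ih]

theorem pyRange_alpha : PySem.List.pyRange 97 123 1 = alphabet.map (fun c => (c.toNat : Int)) := by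
  decide

theorem alphabet_not_digit (c : Char) (h : c ∈ alphabet) : PySem.Chars.isdigit c = false := by
  fin_cases h <;> decide

-- ===== VERDICT (by name: the statement is the Claim_ definition above) =====
set_option maxHeartbeats 1000000 in
theorem betterCompression_spec : Claim_equal_betterCompression := by
  intro compressed _
  unfold Spec_betterCompression betterCompression betterCompression_alt
  apply String.toList_inj.mp
  have hassoc : (fun (res : String) (key : Int) =>
      if (aLoop compressed.toList PySem.Dict.empty).getD (Char.ofNat key.toNat) 0 ≠ 0 then
        res ++ String.ofList [Char.ofNat key.toNat]
            ++ PySem.Int.toStr ((aLoop compressed.toList PySem.Dict.empty).getD (Char.ofNat key.toNat) 0)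
      else res)
    = (fun (res : String) (key : Int) =>
      if (aLoop compressed.toList PySem.Dict.empty).getD (Char.ofNat key.toNat) 0 ≠ 0 then
        res ++ (String.ofList [Char.ofNat key.toNat]
            ++ PySem.Int.toStr ((aLoop compressed.toList PySem.Dict.empty).getD (Char.ofNat key.toNat) 0))
      else res) := by
    funext res key
    rw [String.append_assoc]
  show ((PySem.List.pyRange 97 123 1).foldl _ "").toList = _
  rw [hassoc,
    foldl_if_toList
      (fun k => (aLoop compressed.toList PySem.Dict.empty).getD (Char.ofNat k.toNat) 0 ≠ 0)
      (fun k => String.ofList [Char.ofNat k.toNat]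
          ++ PySem.Int.toStr ((aLoop compressed.toList PySem.Dict.empty).getD (Char.ofNat k.toNat) 0)),
    pyRange_alpha, List.flatMap_map, String.toList_ofList]
  simp only [List.nil_append, String.toList_ofList]
  apply List.flatMap_congr
  intro c hc
  have htot : ((PySem.List.pyRange 0 (PySem.List.len compressed.toList) 1).filter
        (fun i => PySem.List.pyGetD compressed.toList i ' ' == c)).foldl
        (fun acc i => acc + PySem.List.pyGetD (bVal compressed.toList).1 (i + 1) 0) 0
      = (aLoop compressed.toList PySem.Dict.empty).getD c 0 := by
    rw [total_eq_posSum, posSum_eq_tokSum c (alphabet_not_digit c hc), aLoop_getD]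
    simp [PySem.Dict.getD_empty]
  simp only [Int.toNat_natCast, Char.ofNat_toNat, htot, String.toList_append, String.toList_ofList,
    PySem.Int.toList_toStr, List.singleton_append]
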